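-- pv_equiv track=rewrite | github.com/kh277/BOJ | 백준/Gold/12494. Space Emergency （Large）/Space Emergency （Large）.py | solve
-- ===== SOURCE A (Python) =====
-- import heapq
--
-- def solve(L, t, N, C, cNum):
--     '''
--     L : 스피드 부스터 개수
--     t : 스피드 부스터 건설 시간
--     N : 도착까지 거쳐야 하는 별의 수
--     C : 행성 간 거리에서 반복되는 수의 개수
--     cNum : 행성 간 거리
--     '''
--
--     length = []
--     for i in range(N):
--         length.append(cNum[i%C]*2)
--
--     result = 0    # 지나온 거리 저장
--     index = 0    # 현재 탐사하는 별의 인덱스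
--     resultTime = sum(length)    # 도착까지 걸리는 시간
--     pq = []
--
--     # 부스터가 완성되기 전까지 반복
--     while index < N:
--         curRange = length[index]
--
--         # 이번 여행 중 부스터가 완성될 경우
--         if result + curRange >= t:
--             leftRange = result+curRange - t
--             result += t - result
--             heapq.heappush(pq, -leftRange)
--             break
--
--         # 부스터가 완성될 때까지 아직 시간이 남은 경우
--         result += curRange
--         index += 1
--
--     # 부스터가 완성되고 남은 거리는 우선순위 큐에 추가
--     for i in range(index+1, N):
--         heapq.heappush(pq, -length[i])
--
--     # 부스터 L회 사용
--     for i in range(L):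
--         if pq:
--             resultTime += heapq.heappop(pq)//2
--
--     return resultTime
-- ===== SOURCE B (Python) =====
-- def solve(L, t, N, C, cNum):
--     # sort-based rewrite: walk once to the booster-completion point, then sort the
--     # remaining pieces descending and halve (ceil) the largest max(L,0) of them.
--     segs = [cNum[i % C] * 2 for i in range(N)]
--     total = sum(segs)
--     pieces = []
--     travelled = 0
--     for i, s in enumerate(segs):
--         if travelled + s >= t:
--             pieces = [travelled + s - t] + segs[i + 1:]
--             break
--         travelled += s
--     pieces.sort(reverse=True)
--     for v in pieces[:max(L, 0)]:
--         total -= (v + 1) // 2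
--     return total
-- ===== Notes on version B (the rewrite author's own statement) =====
-- stated objective: alternative
-- what changed: Replaces A's priority queue (N heappushes of negated lengths and L min-pops with the //2 negation trick) by a single descending sort of the remaining pieces followed by a ceil-halving pass over the first max(L,0) of them; the fragment and suffix are collected in the same walk via a slice instead of a second push loop.
import Mathlib
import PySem

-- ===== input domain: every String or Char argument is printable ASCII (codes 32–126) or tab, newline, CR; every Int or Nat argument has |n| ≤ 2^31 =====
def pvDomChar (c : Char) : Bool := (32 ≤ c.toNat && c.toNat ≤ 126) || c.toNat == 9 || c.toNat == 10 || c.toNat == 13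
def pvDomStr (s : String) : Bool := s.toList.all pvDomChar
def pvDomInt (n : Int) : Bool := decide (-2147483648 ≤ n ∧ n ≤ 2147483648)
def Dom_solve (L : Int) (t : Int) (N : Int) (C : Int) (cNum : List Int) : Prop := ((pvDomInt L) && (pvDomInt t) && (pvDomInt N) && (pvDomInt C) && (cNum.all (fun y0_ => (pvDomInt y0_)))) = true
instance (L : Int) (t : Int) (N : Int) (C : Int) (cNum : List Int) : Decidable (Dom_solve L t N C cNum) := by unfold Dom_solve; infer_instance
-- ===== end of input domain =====

-- B replaces A's heap (N pushes + L min-pops of negated lengths) by one descending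
-- sort of the remaining pieces and a ceil-halving pass over the first max(L,0);
-- objective: alternative structure (same result, no heap).

-- ===== PORT A =====
-- A's while loop over `length` from the current index (consumes the suffix, carrying
-- result and index); returns (final index, the pq contents pushed by the break branch).
def walkA (t : Int) : List Int → Int → Int → Int × List Int
  | [], _result, idx => (idx, [])
  | cur :: rest, result, idx =>
    if result + cur ≥ t then (idx, [-(result + cur - t)])
    else walkA t rest (result + cur) (idx + 1)

-- heapq modelled as the multiset of its elements: heappop returns the minimum and
-- the remaining elements (value-for-value what Python's heappop yields on Ints).
def heapPopMin : List Int → Option (Int × List Int)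
  | [] => none
  | x :: xs =>
    match heapPopMin xs with
    | none => some (x, [])
    | some (m, rest) => if x ≤ m then some (x, xs) else some (m, x :: rest)

-- A's `for i in range(L): if pq: resultTime += heappop(pq)//2`
def popLoopA : Nat → List Int → Int → Int
  | 0, _, acc => acc
  | n+1, pq, acc =>
    match heapPopMin pq with
    | none => popLoopA n pq acc
    | some (m, rest) => popLoopA n rest (acc + PySem.Int.floordiv m 2)

def solve (L : Int) (t : Int) (N : Int) (C : Int) (cNum : List Int) : Int :=
  let length := (PySem.List.pyRange 0 N 1).foldl
    (fun acc i => acc ++ [(PySem.List.pyGetD cNum (PySem.Int.mod i C) 0) * 2]) []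
  let resultTime := length.sum
  let w := walkA t length 0 0
  let pq := (PySem.List.pyRange (w.1 + 1) N 1).foldl
    (fun pq i => pq ++ [-(PySem.List.pyGetD length i 0)]) w.2
  popLoopA L.toNat pq resultTime

-- ===== PORT B =====
-- B's single walk: the fragment left at booster completion followed by the untravelled segments.
def walkB (t : Int) : List Int → Int → List Int
  | [], _ => []
  | s :: rest, tr => if tr + s ≥ t then (tr + s - t) :: rest else walkB t rest (tr + s)

def solve_alt (L : Int) (t : Int) (N : Int) (C : Int) (cNum : List Int) : Int :=
  let segs := (PySem.List.pyRange 0 N 1).map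
    (fun i => (PySem.List.pyGetD cNum (PySem.Int.mod i C) 0) * 2)
  let total := segs.sum
  let pieces := PySem.List.sorted (walkB t segs 0) (fun x => x) true
  (pieces.take (max L 0).toNat).foldl (fun acc v => acc - PySem.Int.floordiv (v + 1) 2) total

-- ===== PRECONDITION & SPEC =====
-- Pre_ excludes exactly the inputs where Python A raises: C == 0 with N > 0
-- (ZeroDivisionError in i%C) or an index i%C falling outside cNum (IndexError).
def Pre_solve (L : Int) (t : Int) (N : Int) (C : Int) (cNum : List Int) : Prop :=
  N ≤ 0 ∨ (0 < C ∧ min N C ≤ (cNum.length : Int)) ∨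
    (C < 0 ∧ 1 ≤ (cNum.length : Int) ∧ (N ≤ 1 ∨ -C - 1 ≤ (cNum.length : Int)))
instance (L : Int) (t : Int) (N : Int) (C : Int) (cNum : List Int) : Decidable (Pre_solve L t N C cNum) := by unfold Pre_solve; infer_instance

def pvWitness_solve : Int × Int × Int × Int × List Int := (1, 5, 3, 2, [3, 4])

def Spec_solve (L : Int) (t : Int) (N : Int) (C : Int) (cNum : List Int) (out : Int) : Prop := out = solve_alt L t N C cNum
instance (L : Int) (t : Int) (N : Int) (C : Int) (cNum : List Int) (out : Int) : Decidable (Spec_solve L t N C cNum out) := by unfold Spec_solve; infer_instance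

-- ===== CLAIM (what is proved, stated in full; the proofs are below) =====
def Claim_equal_solve : Prop := ∀ (L : Int) (t : Int) (N : Int) (C : Int) (cNum : List Int), Dom_solve L t N C cNum → Pre_solve L t N C cNum → Spec_solve L t N C cNum (solve L t N C cNum)

-- ===== LEMMAS AND PROOFS =====

-- building a list by appending singletons is mapping
theorem foldl_append_singleton {α β : Type} (g : α → β) :
    ∀ (l : List α) (init : List β),
      l.foldl (fun acc v => acc ++ [g v]) init = init ++ l.map g := by
  intro l
  induction l with
  | nil => simp [List.foldl]
  | cons x xs ih => intro init; simp [List.foldl, ih]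

theorem foldl_sub_eq {α : Type} (g : α → Int) :
    ∀ (l : List α) (init : Int),
      l.foldl (fun acc v => acc - g v) init = init - (l.map g).sum := by
  intro l
  induction l with
  | nil => simp [List.foldl]
  | cons x xs ih => intro init; simp [List.foldl, ih]; ring

theorem heapPopMin_eq_none : ∀ (l : List Int), heapPopMin l = none ↔ l = [] := by
  intro l
  cases l with
  | nil => simp [heapPopMin]
  | cons x xs =>
    simp only [heapPopMin]
    cases h : heapPopMin xs with
    | none => simp
    | some p => by_cases hx : x ≤ p.1 <;> simp [hx]

theorem heapPopMin_spec : ∀ (l : List Int) (m : Int) (rest : List Int),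
    heapPopMin l = some (m, rest) → (m :: rest).Perm l ∧ ∀ y ∈ l, m ≤ y := by
  intro l
  induction l with
  | nil => intro m rest h; simp [heapPopMin] at h
  | cons x xs ih =>
    intro m rest h
    simp only [heapPopMin] at h
    cases hx : heapPopMin xs with
    | none =>
      have hnil : xs = [] := (heapPopMin_eq_none xs).mp hx
      rw [hx] at h
      simp at h
      obtain ⟨hm, hr⟩ := h
      subst hm; subst hr; subst hnil
      constructor
      · exact List.Perm.refl _
      · intro y hy; simp at hy; omega
    | some p =>
      rw [hx] at h
      obtain ⟨hperm, hmin⟩ := ih p.1 p.2 (by rw [hx])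
      by_cases hle : x ≤ p.1
      · simp [hle] at h
        obtain ⟨hm, hr⟩ := h
        subst hm; subst hr
        refine ⟨List.Perm.refl _, ?_⟩
        intro y hy
        rcases List.mem_cons.mp hy with h1 | h2
        · omega
        · have := hmin y h2
          omega
      · simp [hle] at h
        obtain ⟨hm, hr⟩ := h
        subst hm; subst hr
        constructor
        · -- (p.1 :: x :: p.2) ~ (x :: xs)
          exact (List.Perm.swap x p.1 p.2).trans (hperm.cons x)
        · intro y hy
          rcases List.mem_cons.mp hy with h1 | h2
          · omega
          · have := hmin y h2; exact this

theorem heapPopMin_congr_perm (l l' : List Int) (hp : l.Perm l') (m : Int) (rest : List Int)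
    (h : heapPopMin l = some (m, rest)) :
    ∃ rest', heapPopMin l' = some (m, rest') ∧ rest.Perm rest' := by
  obtain ⟨hperm, hmin⟩ := heapPopMin_spec l m rest h
  cases hl' : heapPopMin l' with
  | none =>
    have : l' = [] := (heapPopMin_eq_none l').mp hl'
    subst this
    have : l = [] := hp.eq_nil
    subst this
    simp [heapPopMin] at h
  | some p =>
    obtain ⟨m1, rest1⟩ := p
    obtain ⟨hperm', hmin'⟩ := heapPopMin_spec l' m1 rest1 hl'
    have hm_mem : m ∈ l' := hp.subset (hperm.subset (by simp))
    have hp_mem : m1 ∈ l := hp.symm.subset (hperm'.subset (by simp))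
    have heq : m1 = m := le_antisymm (hmin' m hm_mem) (hmin m1 hp_mem)
    subst heq
    refine ⟨rest1, rfl, ?_⟩
    -- rest ~ l.erase m1 ~ l'.erase m1 ~ rest1
    have h1 : (m1 :: rest).Perm (m1 :: l.erase m1) :=
      hperm.trans (List.perm_cons_erase (hperm.subset (by simp)))
    have h2 : (m1 :: rest1).Perm (m1 :: l'.erase m1) :=
      hperm'.trans (List.perm_cons_erase (hperm'.subset (by simp)))
    have h3 : (l.erase m1).Perm (l'.erase m1) := hp.erase m1
    exact (h1.cons_inv.trans h3).trans h2.cons_inv.symm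

theorem popLoopA_congr_perm (n : Nat) :
    ∀ (l l' : List Int) (acc : Int), l.Perm l' → popLoopA n l acc = popLoopA n l' acc := by
  induction n with
  | zero => intro l l' acc _; simp [popLoopA]
  | succ n ih =>
    intro l l' acc hp
    simp only [popLoopA]
    cases h : heapPopMin l with
    | none =>
      have : l = [] := (heapPopMin_eq_none l).mp h
      subst this
      have : l' = [] := hp.symm.eq_nil
      subst this
      simp [heapPopMin]
    | some p =>
      obtain ⟨rest', hl', hr⟩ := heapPopMin_congr_perm l l' hp p.1 p.2 h
      rw [hl']
      exact ih p.2 rest' _ hr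

theorem heapPopMin_pairwise (x : Int) (xs : List Int)
    (h : (x :: xs).Pairwise (· ≤ ·)) : heapPopMin (x :: xs) = some (x, xs) := by
  simp only [heapPopMin]
  cases hx : heapPopMin xs with
  | none =>
    have : xs = [] := (heapPopMin_eq_none xs).mp hx
    subst this; rfl
  | some p =>
    obtain ⟨hperm, _⟩ := heapPopMin_spec xs p.1 p.2 hx
    have hmem : p.1 ∈ xs := hperm.subset (by simp)
    have hle : x ≤ p.1 := (List.pairwise_cons.mp h).1 p.1 hmem
    simp [hle]

theorem popLoopA_sorted :
    ∀ (l : List Int), l.Pairwise (· ≤ ·) → ∀ (n : Nat) (acc : Int),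
      popLoopA n l acc = acc + ((l.take n).map (fun m => PySem.Int.floordiv m 2)).sum := by
  intro l
  induction l with
  | nil =>
    intro _ n acc
    induction n with
    | zero => simp [popLoopA]
    | succ n ih => simp [popLoopA, heapPopMin] at *; exact ih
  | cons x xs ih =>
    intro hpw n acc
    cases n with
    | zero => simp [popLoopA]
    | succ n =>
      simp only [popLoopA, heapPopMin_pairwise x xs hpw]
      rw [ih (List.pairwise_cons.mp hpw).2 n _]
      simp [List.take, add_assoc]

-- floor((-v)/2) = -floor((v+1)/2)   (Python // by the positive constant 2)
theorem floordiv_neg_half (v : Int) :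
    PySem.Int.floordiv (-v) 2 = -(PySem.Int.floordiv (v + 1) 2) := by
  rw [PySem.Int.floordiv_eq_ediv_of_pos (show (0:Int) < 2 by norm_num),
      PySem.Int.floordiv_eq_ediv_of_pos (show (0:Int) < 2 by norm_num)]
  omega

theorem sum_map_neg (l : List Int) : (l.map (fun v => -v)).sum = -l.sum := by
  induction l with
  | nil => simp
  | cons x xs ih => simp [ih]; ring

-- the pop loop over the negations of a multiset = ceil-halving the L largest of it
theorem popLoop_eq_sorted_take (n : Nat) (pieces : List Int) (total : Int) :
    popLoopA n (pieces.map (fun v => -v)) total =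
      ((PySem.List.sorted pieces (fun x => x) true).take n).foldl
        (fun acc v => acc - PySem.Int.floordiv (v + 1) 2) total := by
  set s := PySem.List.sorted pieces (fun x => x) true with hs
  have hperm : (pieces.map (fun v => -v)).Perm (s.map (fun v => -v)) :=
    (PySem.List.sorted_perm pieces (fun x => x) true).symm.map _
  have hpw : (s.map (fun v => -v)).Pairwise (· ≤ ·) := by
    have := PySem.List.sorted_pairwise_rev pieces (fun x => x)
    rw [← hs] at this
    exact List.Pairwise.map _ (by intro a b h; omega) this
  rw [popLoopA_congr_perm n _ _ total hperm, popLoopA_sorted _ hpw n total,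
      foldl_sub_eq]
  rw [← List.map_take]
  have : ((s.take n).map (fun v => -v)).map (fun m => PySem.Int.floordiv m 2)
      = (s.take n).map (fun v => -(PySem.Int.floordiv (v + 1) 2)) := by
    rw [List.map_map]
    exact List.map_congr_left (fun v _ => floordiv_neg_half v)
  rw [this]
  have h2 : (s.take n).map (fun v => -(PySem.Int.floordiv (v + 1) 2))
      = ((s.take n).map (fun v => PySem.Int.floordiv (v + 1) 2)).map (fun v => -v) := by
    simp [List.map_map, Function.comp_def]
  rw [h2, sum_map_neg]
  ring

-- the relation between A's while loop and B's walk
theorem walk_rel (t : Int) : ∀ (segs : List Int) (tr idx : Int),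
    (walkB t segs tr = [] → walkA t segs tr idx = (idx + segs.length, [])) ∧
    (∀ x rest, walkB t segs tr = x :: rest →
      ∃ k : Nat, walkA t segs tr idx = (idx + k, [-x]) ∧ (k : Int) < segs.length ∧
        rest = segs.drop (k + 1)) := by
  intro segs
  induction segs with
  | nil =>
    intro tr idx
    constructor
    · intro _; simp [walkA]
    · intro x rest h; simp [walkB] at h
  | cons s ss ih =>
    intro tr idx
    by_cases hbr : tr + s ≥ t
    · constructor
      · intro h; simp [walkB, hbr] at h
      · intro x rest h
        simp [walkB, hbr] at h
        obtain ⟨hx, hr⟩ := h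
        refine ⟨0, ?_, by simp, by simp [hr]⟩
        simp [walkA, hbr, hx]
    · constructor
      · intro h
        simp [walkB, hbr] at h
        have := (ih (tr + s) (idx + 1)).1 h
        simp [walkA, hbr, this]
        omega
      · intro x rest h
        simp [walkB, hbr] at h
        obtain ⟨k, hA, hk, hr⟩ := (ih (tr + s) (idx + 1)).2 x rest h
        refine ⟨k + 1, ?_, by simp; omega, by simpa using hr⟩
        simp only [walkA, if_neg (by omega)]
        rw [hA]
        simp only [Prod.mk.injEq]
        exact ⟨by push_cast; omega, trivial⟩

-- A's second push loop, as a list operation on segs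
theorem pq_fold (segs : List Int) (N a : Int) (init : List Int) (ha : 0 ≤ a)
    (hN : segs.length = N.toNat) :
    (PySem.List.pyRange a N 1).foldl
        (fun pq i => pq ++ [-(PySem.List.pyGetD segs i 0)]) init
      = init ++ (segs.drop a.toNat).map (fun v => -v) := by
  by_cases hNneg : N ≤ 0
  · have hnil : segs = [] := by
      have : segs.length = 0 := by omega
      exact List.eq_nil_of_length_eq_zero this
    rw [PySem.List.pyRange_one_eq_nil (by omega)]
    simp [hnil]
  · have hNlen : N = (segs.length : Int) := by omega
    rw [hNlen]
    rw [PySem.List.foldl_pyRange_pyGetD' segs 0 (fun acc v => acc ++ [-v]) init ha]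
    exact foldl_append_singleton (fun v => -v) _ init

-- ===== VERDICT (by name: the statement is the Claim_ definition above) =====
theorem solve_spec : Claim_equal_solve := by
  intro L t N C cNum _hdom _hpre
  unfold Spec_solve solve solve_alt
  rw [foldl_append_singleton]
  simp only [List.nil_append]
  set segs := (PySem.List.pyRange 0 N 1).map
    (fun i => (PySem.List.pyGetD cNum (PySem.Int.mod i C) 0) * 2) with hsegs
  have hlen : segs.length = N.toNat := by
    rw [hsegs]; simp [PySem.List.length_pyRange_one]
  have hmax : (max L 0).toNat = L.toNat := by omega
  rw [hmax]
  rcases hw : walkB t segs 0 with _ | ⟨x, rest⟩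
  · have hA := (walk_rel t segs 0 0).1 hw
    rw [hA]
    dsimp only
    rw [pq_fold segs N (0 + (segs.length : Int) + 1) [] (by omega) hlen]
    have hdrop : segs.drop ((0 + (segs.length : Int) + 1).toNat) = [] := by
      apply List.drop_eq_nil_of_le; omega
    rw [hdrop]
    simpa [hw] using popLoop_eq_sorted_take L.toNat [] segs.sum
  · obtain ⟨k, hA, hk, hr⟩ := (walk_rel t segs 0 0).2 x rest hw
    rw [hA]
    dsimp only
    rw [pq_fold segs N (0 + (k : Int) + 1) [-x] (by omega) hlen]
    have hdrop : segs.drop ((0 + (k : Int) + 1).toNat) = rest := by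
      rw [hr]; congr 1; omega
    rw [hdrop]
    have hmap : [-x] ++ rest.map (fun v => -v) = (x :: rest).map (fun v => -v) := by simp
    rw [hmap]
    exact popLoop_eq_sorted_take L.toNat (x :: rest) segs.sum
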